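-- pv_equiv track=rewrite | github.com/phanmanhcuongdev/Python-CodePTIT | ICPC0106.py | convert_bin_to_base
-- ===== SOURCE A (Python) =====
-- def convert_bin_to_base(x:str,b:int)-> str:
--     if b==2:
--         return x.lstrip('0') or '0'
--     kmap = {4:2,8:3,16:4}
--     k = kmap[b]
--     pad = (-len(x))%k
--     x = '0'*pad + x
--     parts = [x[i:i+k] for i in range(0,len(x),k)]
--     digits = []
--     for p in parts:
--         v = int(p,2)
--         if v<10:
--             digits.append(str(v))
--         else:
--             digits.append(chr(ord('A')+v-10))
--     out = ''.join(digits).lstrip('0') or '0'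
--     return out
-- ===== SOURCE B (Python) =====
-- def convert_bin_to_base(x: str, b: int) -> str:
--     if b == 2:
--         return x.lstrip('0') or '0'
--     n = int(x, 2) if x else 0
--     if n == 0:
--         return '0'
--     digits = []
--     while n:
--         n, r = divmod(n, b)
--         digits.append(str(r) if r < 10 else chr(ord('A') + r - 10))
--     return ''.join(reversed(digits))
-- ===== Notes on version B (the rewrite author's own statement) =====
-- stated objective: alternative
-- what changed: Replaces A's pad/slice/chunk-and-map string pass with a single int(x,2) conversion followed by a divmod(n,b) remainder loop that emits the base-b digits back-to-front.
-- outside the precondition, e.g. on convert_bin_to_base('11 11', 4): A returns '113', B raises ValueError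
import Mathlib
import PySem

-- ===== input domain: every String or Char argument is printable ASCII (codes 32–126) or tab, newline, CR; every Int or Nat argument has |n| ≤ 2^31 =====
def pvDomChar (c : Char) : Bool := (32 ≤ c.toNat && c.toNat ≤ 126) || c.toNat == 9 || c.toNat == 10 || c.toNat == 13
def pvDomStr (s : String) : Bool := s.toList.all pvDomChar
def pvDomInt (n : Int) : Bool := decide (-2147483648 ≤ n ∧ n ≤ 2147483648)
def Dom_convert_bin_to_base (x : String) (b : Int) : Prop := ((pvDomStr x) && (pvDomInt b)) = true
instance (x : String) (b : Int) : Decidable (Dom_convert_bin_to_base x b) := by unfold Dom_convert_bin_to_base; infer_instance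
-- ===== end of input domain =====

-- B converts via int(x,2) and a divmod digit loop instead of A's pad/slice/chunk pass (alternative decomposition, same results).


-- ===== PORT A =====
-- int(p, 2): hand-ported bit parser, exact on strings made only of '0'/'1' characters — exactly what
-- Pre_ admits on the b ≠ 2 branch (general int(_, 2) also accepts sign/space/underscore; excluded by Pre_).
def pvBitsVal (l : List Char) : Int := l.foldl (fun a c => 2 * a + (if c == '1' then 1 else 0)) 0

-- str(v) if v < 10 else chr(ord('A') + v - 10), as the character list that gets joined
def pvDigit (v : Int) : List Char := if v < 10 then PySem.Int.toChars v else [Char.ofNat (65 + v - 10).toNat]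

def convert_bin_to_base (x : String) (b : Int) : String :=
  if b == 2 then
    -- x.lstrip('0') or '0'  (lstrip with the single-character strip set {'0'} is dropWhile; exact)
    let s := x.toList.dropWhile (· == '0')
    if s = [] then "0" else String.ofList s
  else
    -- k = kmap[b]; any b outside {4, 8, 16} raises KeyError and is excluded by Pre_
    let k : Int := if b == 4 then 2 else if b == 8 then 3 else 4
    let pad := PySem.Int.mod (-(x.toList.length : Int)) k
    let xl := List.replicate pad.toNat '0' ++ x.toList
    let parts := (PySem.List.pyRange 0 (xl.length : Int) k).map
      (fun i => PySem.List.slice xl (some i) (some (i + k)))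
    let digits := parts.map (fun p => pvDigit (pvBitsVal p))
    let out := (PySem.Chars.join [] digits).dropWhile (· == '0')
    if out = [] then "0" else String.ofList out

-- ===== PORT B =====
-- B's while loop: one base-b digit per iteration, little-endian; fuel n.toNat + 1 only bounds the
-- iteration count (n strictly decreases under division by b ≥ 4 inside Pre_)
def pvToDigits : Nat → Int → Int → List (List Char)
  | 0, _, _ => []
  | f + 1, n, b =>
    if n == 0 then []
    else pvDigit (PySem.Int.mod n b) :: pvToDigits f (PySem.Int.floordiv n b) b

def convert_bin_to_base_alt (x : String) (b : Int) : String :=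
  if b == 2 then
    let s := x.toList.dropWhile (· == '0')
    if s = [] then "0" else String.ofList s
  else
    let n : Int := if x.toList = [] then 0 else pvBitsVal x.toList  -- int(x, 2) if x else 0
    if n == 0 then "0"
    else String.ofList (PySem.Chars.join [] (pvToDigits (n.toNat + 1) n b).reverse)

-- ===== PRECONDITION & SPEC =====
-- Pre_ excludes b outside {2, 4, 8, 16}, where A raises KeyError, and — for b ≠ 2 — strings with
-- characters other than '0'/'1', on which A's per-chunk int(p, 2) usually raises ValueError but can
-- accidentally accept chunk-local whitespace/sign/underscore that B's whole-string int(x, 2) rejects.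
def Pre_convert_bin_to_base (x : String) (b : Int) : Prop :=
  b = 2 ∨ ((b = 4 ∨ b = 8 ∨ b = 16) ∧ x.toList.all (fun c => c == '0' || c == '1') = true)
instance (x : String) (b : Int) : Decidable (Pre_convert_bin_to_base x b) := by
  unfold Pre_convert_bin_to_base; infer_instance

def pvWitness_convert_bin_to_base : String × Int := ("1011", 16)

def Spec_convert_bin_to_base (x : String) (b : Int) (out : String) : Prop := out = convert_bin_to_base_alt x b
instance (x : String) (b : Int) (out : String) : Decidable (Spec_convert_bin_to_base x b out) := by
  unfold Spec_convert_bin_to_base; infer_instance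

-- ===== CLAIM (what is proved, stated in full; the proofs are below) =====
def Claim_equal_convert_bin_to_base : Prop := ∀ (x : String) (b : Int), Dom_convert_bin_to_base x b → Pre_convert_bin_to_base x b → Spec_convert_bin_to_base x b (convert_bin_to_base x b)

-- ===== LEMMAS AND PROOFS =====

-- proof-side name for the digit formatter applied to a Nat
def pvDigitN (d : Nat) : List Char := pvDigit (d : Int)

-- Nat-level value of a bit string (proof-side mirror of pvBitsVal)
def natBits (l : List Char) : Nat := l.foldl (fun a c => 2 * a + (if c == '1' then 1 else 0)) 0

-- the single character both digit formatters produce for v < 16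
def hexChar (v : Nat) : Char := if v < 10 then Char.ofNat (48 + v) else Char.ofNat (55 + v)

-- structural chunking mirror of A's slice comprehension
def chunks : Nat → Nat → List Char → List (List Char)
  | 0, _, _ => []
  | m + 1, k, l => l.take k :: chunks m k (l.drop k)

theorem natBits_from (l : List Char) (a : Nat) :
    l.foldl (fun a c => 2 * a + (if c == '1' then 1 else 0)) a = a * 2 ^ l.length + natBits l := by
  induction l generalizing a with
  | nil => simp [natBits]
  | cons c t ih =>
    simp only [List.foldl_cons, List.length_cons, natBits]
    rw [ih, ih (2 * 0 + if c == '1' then 1 else 0)]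
    ring
theorem pvBitsVal_eq (l : List Char) : pvBitsVal l = (natBits l : Int) := by
  suffices h : ∀ (a : Nat), l.foldl (fun a c => 2 * a + (if c == '1' then 1 else 0)) (a : Int)
      = ((l.foldl (fun a c => 2 * a + (if c == '1' then 1 else 0)) a : Nat) : Int) by
    simpa [pvBitsVal, natBits] using h 0
  induction l with
  | nil => simp
  | cons c t ih =>
    intro a
    simp only [List.foldl_cons]
    rw [← ih]
    congr 1
    push_cast
    split <;> simp
theorem natBits_append (u v : List Char) :
    natBits (u ++ v) = natBits u * 2 ^ v.length + natBits v := by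
  simp only [natBits, List.foldl_append]
  rw [natBits_from v]
  rfl
theorem natBits_replicate (p : Nat) : natBits (List.replicate p '0') = 0 := by
  induction p with
  | zero => rfl
  | succ n ih => simpa [List.replicate_succ, natBits, List.foldl_cons] using ih
theorem natBits_lt (l : List Char) : natBits l < 2 ^ l.length := by
  induction l with
  | nil => simp [natBits]
  | cons c t ih =>
    have h : natBits (c :: t) = (if c == '1' then 1 else 0) * 2 ^ t.length + natBits t := by
      simpa [natBits, List.foldl_cons] using natBits_from t (2 * 0 + if c == '1' then 1 else 0)
    rw [h]
    have : (if c == '1' then 1 else 0) ≤ 1 := by split <;> omega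
    have h2 : (0:Nat) < 2 ^ t.length := Nat.two_pow_pos _
    simp only [List.length_cons, pow_succ]
    nlinarith
theorem chunks_length (m k : Nat) (l : List Char) : (chunks m k l).length = m := by
  induction m generalizing l with
  | zero => rfl
  | succ n ih => simp [chunks, ih]
theorem chunks_short (m k : Nat) (l : List Char) : ∀ c ∈ chunks m k l, c.length ≤ k := by
  induction m generalizing l with
  | zero => simp [chunks]
  | succ n ih =>
    intro c hc
    rcases (by simpa [chunks] using hc : c = l.take k ∨ c ∈ chunks n k (l.drop k)) with h | h
    · subst h; simpa using List.length_take_le k l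
    · exact ih _ c h
theorem natBits_chunks (k : Nat) (hk : 0 < k) :
    ∀ (m : Nat) (l : List Char), l.length = k * m →
      natBits l = Nat.ofDigits (2 ^ k) ((chunks m k l).map natBits).reverse := by
  intro m
  induction m with
  | zero =>
    intro l hl
    have : l = [] := List.eq_nil_of_length_eq_zero (by omega)
    subst this
    simp [chunks, natBits]
  | succ n ih =>
    intro l hl
    have hlen : (l.drop k).length = k * n := by simp [hl, Nat.mul_succ]
    have htk : (l.take k).length = k := by simp [hl, Nat.mul_succ]
    have := ih (l.drop k) hlen
    conv_lhs => rw [← List.take_append_drop k l]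
    rw [natBits_append, this]
    simp only [chunks, List.map_cons, List.reverse_cons]
    rw [Nat.ofDigits_append]
    have hrl : (((chunks n k (l.drop k)).map natBits).reverse).length = n := by
      simp [chunks_length]
    rw [hrl]
    simp [hlen, pow_mul, Nat.ofDigits_singleton]
    ring
theorem chunks_eq_map (k m : Nat) (l : List Char) :
    chunks m k l = (List.range m).map (fun j => (l.drop (k * j)).take k) := by
  induction m generalizing l with
  | zero => rfl
  | succ n ih =>
    rw [List.range_succ_eq_map]
    simp only [chunks, List.map_cons, List.map_map]
    rw [ih (l.drop k)]
    simp [Function.comp, Nat.mul_succ, List.drop_drop]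
    intro a _
    congr 2
    omega
theorem parts_eq (k m : Nat) (hk : 0 < k) (l : List Char) (hl : l.length = k * m) :
    (PySem.List.pyRange 0 (l.length : Int) (k : Int)).map
      (fun i => PySem.List.slice l (some i) (some (i + (k : Int)))) = chunks m k l := by
  rw [PySem.List.pyRange_of_pos _ _ (by exact_mod_cast hk)]
  rcases Nat.eq_zero_or_pos m with hm | hm
  · subst hm
    have : l = [] := List.eq_nil_of_length_eq_zero (by omega)
    subst this
    simp [chunks]
  · have hlt : (0 : Int) < (l.length : Int) := by
      have : 0 < l.length := by rw [hl]; positivity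
      exact_mod_cast this
    rw [if_pos hlt]
    have hcount : (((l.length : Int) - 0 + (k : Int) - 1) / (k : Int)).toNat = m := by
      rw [hl]
      push_cast
      have h1 : ((k : Int) * m + k - 1) = (k - 1) + (m : Int) * k := by ring
      rw [sub_zero, h1, Int.add_mul_ediv_right _ _ (by exact_mod_cast hk.ne')]
      rw [Int.ediv_eq_zero_of_lt (by omega) (by omega)]
      simp
    rw [hcount, chunks_eq_map, List.map_map]
    apply List.map_congr_left
    intro j hj
    show PySem.List.slice l (some (0 + (k:Int) * j)) (some (0 + (k:Int) * j + k)) = _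
    have e1 : (0 + (k:Int) * j) = ((k * j : Nat) : Int) := by push_cast; ring
    rw [e1]
    exact PySem.List.slice_natCast_add l (k*j) k
theorem pvDigit_eq (v : Nat) (h : v < 16) : pvDigit (v : Int) = [hexChar v] := by
  interval_cases v <;> decide
theorem hexChar_beq_zero (v : Nat) (h : v < 16) : (hexChar v == '0') = (v == 0) := by
  interval_cases v <;> decide
theorem dropWhile_map_hexChar (V : List Nat) (h : ∀ v ∈ V, v < 16) :
    (V.map hexChar).dropWhile (· == '0') = (V.dropWhile (· == 0)).map hexChar := by
  induction V with
  | nil => rfl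
  | cons v t ih =>
    simp only [List.map_cons, List.dropWhile_cons]
    rw [hexChar_beq_zero v (h v (by simp))]
    by_cases hv : v = 0
    · subst hv; simpa using ih (fun w hw => h w (by simp [hw]))
    · simp [hv]
theorem ofDigits_zero_of_all (B : Nat) (L : List Nat) (h : ∀ v ∈ L, v = 0) :
    Nat.ofDigits B L = 0 := by
  induction L with
  | nil => rfl
  | cons v t ih =>
    rw [Nat.ofDigits_cons, h v (by simp), ih (fun w hw => h w (by simp [hw]))]
    simp
theorem all_zero_of_ofDigits_eq_zero (B : Nat) (hB : 0 < B) (L : List Nat)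
    (h : Nat.ofDigits B L = 0) : ∀ v ∈ L, v = 0 := by
  induction L with
  | nil => simp
  | cons v t ih =>
    rw [Nat.ofDigits_cons] at h
    have hv : v = 0 ∧ B * Nat.ofDigits B t = 0 := by omega
    have ht : Nat.ofDigits B t = 0 := by
      rcases Nat.mul_eq_zero.mp hv.2 with h' | h'
      · omega
      · exact h'
    intro w hw
    rcases List.mem_cons.mp hw with rfl | hw'
    · exact hv.1
    · exact ih ht w hw'
theorem pvToDigits_eq (B : Nat) (hB : 1 < B) :
    ∀ (f n : Nat), n ≤ f →
      pvToDigits f (n : Int) (B : Int) = (Nat.digits B n).map pvDigitN := by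
  intro f
  induction f with
  | zero =>
    intro n hn
    have : n = 0 := by omega
    subst this
    simp [pvToDigits]
  | succ f ih =>
    intro n hn
    by_cases h0 : n = 0
    · subst h0; simp [pvToDigits]
    · have hne : ((n : Int) == 0) = false := by simp; exact_mod_cast h0
      simp only [pvToDigits, hne, Bool.false_eq_true, if_false]
      rw [PySem.Int.mod_natCast, PySem.Int.floordiv_natCast]
      rw [Nat.digits_def' hB (Nat.pos_of_ne_zero h0), List.map_cons]
      rw [show pvDigitN (n % B) = pvDigit ((n % B : Nat) : Int) from rfl]
      congr 1
      exact ih (n / B) (by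
        have := Nat.div_lt_self (Nat.pos_of_ne_zero h0) hB
        omega)
theorem core (xs : List Char) (k : Nat) (hk2 : 2 ≤ k) (hk4 : k ≤ 4) :
    (let kI : Int := (k : Nat);
     let pad := PySem.Int.mod (-(xs.length : Int)) kI
     let xl := List.replicate pad.toNat '0' ++ xs
     let parts := (PySem.List.pyRange 0 (xl.length : Int) kI).map
       (fun i => PySem.List.slice xl (some i) (some (i + kI)))
     let out := (PySem.Chars.join [] (parts.map (fun p => pvDigit (pvBitsVal p)))).dropWhile (· == '0')
     if out = [] then "0" else String.ofList out)
    =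
    (let n : Int := if xs = [] then 0 else pvBitsVal xs
     if n == 0 then "0"
     else String.ofList (PySem.Chars.join [] (pvToDigits (n.toNat + 1) n ((2 ^ k : Nat) : Int)).reverse)) := by
  have hk : 0 < k := by omega
  have hkI : (0:Int) < (k : Int) := by exact_mod_cast hk
  have hB1 : 1 < 2 ^ k := Nat.one_lt_two_pow (by omega)
  have hB16 : 2 ^ k ≤ 16 := by calc 2 ^ k ≤ 2 ^ 4 := Nat.pow_le_pow_right (by omega) hk4
                                   _ = 16 := by norm_num
  set L := xs.length with hL
  set pad := PySem.Int.mod (-(L : Int)) (k : Int) with hpaddef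
  set P := pad.toNat with hPdef
  have hpad : pad = (-(L:Int)) % (k:Int) := PySem.Int.mod_eq_emod_of_pos hkI
  have hpadnn : 0 ≤ pad := by rw [hpad]; exact Int.emod_nonneg _ (by omega)
  have hPcast : (P : Int) = pad := Int.toNat_of_nonneg hpadnn
  have hdvdI : (k : Int) ∣ (pad + L) := by
    rw [hpad, Int.emod_def]
    exact ⟨-((-(L:Int)) / (k:Int)), by ring⟩
  have hdvd : k ∣ (P + L) := by
    have : ((k:Int)) ∣ (((P + L : Nat)) : Int) := by push_cast; rw [hPcast]; exact hdvdI
    exact_mod_cast this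
  set m := (P + L) / k with hmdef
  have hm : P + L = k * m := (Nat.mul_div_cancel' hdvd).symm
  set xl := List.replicate P '0' ++ xs with hxldef
  have hxl : xl.length = k * m := by simp [hxldef, ← hL]; omega
  have hparts := parts_eq k m hk xl hxl
  set V := (chunks m k xl).map natBits with hVdef
  have hVlt : ∀ v ∈ V, v < 2 ^ k := by
    intro v hv
    rw [hVdef] at hv
    rcases List.mem_map.mp hv with ⟨c, hc, rfl⟩
    calc natBits c < 2 ^ c.length := natBits_lt c
      _ ≤ 2 ^ k := Nat.pow_le_pow_right (by omega) (chunks_short m k xl c hc)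
  have hV16 : ∀ v ∈ V, v < 16 := fun v hv => lt_of_lt_of_le (hVlt v hv) hB16
  have hmapdig : (chunks m k xl).map (fun p => pvDigit (pvBitsVal p))
      = (V.map hexChar).map (fun c => [c]) := by
    rw [hVdef, List.map_map, List.map_map]
    apply List.map_congr_left
    intro c hc
    show pvDigit (pvBitsVal c) = [hexChar (natBits c)]
    rw [pvBitsVal_eq]
    exact pvDigit_eq _ (by
      calc natBits c < 2 ^ c.length := natBits_lt c
        _ ≤ 2 ^ k := Nat.pow_le_pow_right (by omega) (chunks_short m k xl c hc)
        _ ≤ 16 := hB16)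
  set N := natBits xs with hNdef
  have hNxl : natBits xl = N := by
    rw [hxldef, natBits_append, natBits_replicate]; ring
  have hNof : N = Nat.ofDigits (2 ^ k) V.reverse := by
    rw [← hNxl]; exact natBits_chunks k hk m xl hxl
  have hn : (if xs = [] then (0:Int) else pvBitsVal xs) = (N : Int) := by
    split
    · rename_i h; rw [hNdef, h]; rfl
    · exact pvBitsVal_eq xs
  set W := V.dropWhile (· == 0) with hWdef
  have hout : (PySem.Chars.join []
      (((PySem.List.pyRange 0 (xl.length : Int) (k:Int)).map
        (fun i => PySem.List.slice xl (some i) (some (i + (k:Int))))).map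
          (fun p => pvDigit (pvBitsVal p)))).dropWhile (· == '0') = W.map hexChar := by
    rw [hparts, hmapdig]
    have : (V.map hexChar).map (fun c => [c]) = List.map (fun c => [c]) (V.map hexChar) := rfl
    rw [this, PySem.Chars.join_nil_singletons]
    exact dropWhile_map_hexChar V hV16
  show (if (PySem.Chars.join [] _).dropWhile (· == '0') = ([]:List Char) then "0" else _) = _
  rw [hout, hn]
  by_cases hN0 : N = 0
  · have hWnil : W = [] := by
      rw [hWdef]
      apply List.dropWhile_eq_nil_iff.mpr
      intro v hv
      have : v = 0 := all_zero_of_ofDigits_eq_zero (2^k) (by omega) V.reverse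
        (by rw [← hNof]; exact hN0) v (List.mem_reverse.mpr hv)
      simp [this]
    rw [hWnil]
    simp [hN0]
  · have hWne : W ≠ [] := by
      intro hWnil
      apply hN0
      rw [hNof]
      apply ofDigits_zero_of_all
      intro v hv
      have hv' := List.mem_reverse.mp hv
      have := List.dropWhile_eq_nil_iff.mp (hWdef ▸ hWnil) v hv'
      simpa using this
    have hNW : N = Nat.ofDigits (2 ^ k) W.reverse := by
      conv_lhs => rw [hNof]
      conv_lhs => rw [← List.takeWhile_append_dropWhile (p := (· == 0)) (l := V)]
      rw [List.reverse_append, Nat.ofDigits_append, ← hWdef]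
      have hz : Nat.ofDigits (2^k) (V.takeWhile (· == 0)).reverse = 0 := by
        apply ofDigits_zero_of_all
        intro v hv
        have := List.mem_takeWhile_imp (List.mem_reverse.mp hv)
        simpa using this
      rw [hz]
      ring
    obtain ⟨w, W', hW'⟩ := List.exists_cons_of_ne_nil hWne
    have hwne : w ≠ 0 := by
      have h := List.head?_dropWhile_not (fun v => v == 0) V
      rw [← hWdef, hW'] at h
      simpa using h
    have hdig : Nat.digits (2 ^ k) N = W.reverse := by
      rw [hNW]
      apply Nat.digits_ofDigits _ hB1
      · intro v hv
        exact hVlt v ((List.dropWhile_sublist _).subset (hWdef ▸ List.mem_reverse.mp hv))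
      · intro h
        have h1 : W.reverse.getLast? = some w := by rw [List.getLast?_reverse, hW']; rfl
        rw [List.getLast?_eq_some_getLast h] at h1
        intro hcon
        rw [hcon] at h1
        exact hwne (Option.some_injective _ h1).symm
    have hNne : ((N : Int) == 0) = false := by simp; exact_mod_cast hN0
    simp only [hNne, Bool.false_eq_true, if_false]
    have hmapW : W.map hexChar ≠ [] := by simp [hW']
    rw [if_neg hmapW]
    congr 1
    rw [Int.toNat_natCast, pvToDigits_eq (2^k) hB1 (N+1) N (by omega), hdig]
    rw [← List.map_reverse, List.reverse_reverse]
    have : W.map pvDigitN = List.map (fun c => [c]) (W.map hexChar) := by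
      rw [List.map_map]
      apply List.map_congr_left
      intro v hv
      exact pvDigit_eq v (lt_of_lt_of_le (hVlt v ((List.dropWhile_sublist _).subset (hWdef ▸ hv))) hB16)
    rw [this, PySem.Chars.join_nil_singletons]
theorem core' (x : String) (k : Nat) (hk2 : 2 ≤ k) (hk4 : k ≤ 4) (b : Int)
    (hb2 : (b == 2) = false)
    (hbk : (if b == 4 then (2 : Int) else if b == 8 then 3 else 4) = ((k : Nat) : Int))
    (hbB : b = ((2 ^ k : Nat) : Int)) :
    convert_bin_to_base x b = convert_bin_to_base_alt x b := by
  unfold convert_bin_to_base convert_bin_to_base_alt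
  simp only [hb2, Bool.false_eq_true, if_false]
  rw [hbk]
  conv_rhs => rw [hbB]
  exact core x.toList k hk2 hk4

theorem convert_bin_to_base_spec : Claim_equal_convert_bin_to_base := by
  intro x b _ hpre
  unfold Spec_convert_bin_to_base
  rcases hpre with rfl | ⟨hb, -⟩
  · have h : ((2:Int) == 2) = true := by decide
    simp only [convert_bin_to_base, convert_bin_to_base_alt, h, if_true]
  · rcases hb with rfl | rfl | rfl
    · exact core' x 2 (by omega) (by omega) 4 (by decide) (by norm_num) (by norm_num)
    · exact core' x 3 (by omega) (by omega) 8 (by decide) (by norm_num) (by norm_num)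
    · exact core' x 4 (by omega) (by omega) 16 (by decide) (by norm_num) (by norm_num)
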